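-- pv_equiv track=rewrite | github.com/CodeWebMobile-AI/cwmai | scripts/intelligent_task_generator.py | _categorize_project
-- ===== SOURCE A (Python) =====
-- from typing import Dict, List, Any, Optional, Tuple
--
-- def _categorize_project(project: Dict[str, Any]) -> str:
--     """Categorize a project based on its characteristics.
--
--     Args:
--         project: Project details
--
--     Returns:
--         Project category
--     """
--     name = project.get('name', '').lower()
--     description = project.get('description', '').lower()
--     text = f"{name} {description}"
--
--     # Simple categorization
--     if any(word in text for word in ['auth', 'login', '2fa', 'oauth']):
--         return 'authentication'
--     elif any(word in text for word in ['api', 'rest', 'graphql']):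
--         return 'api_service'
--     elif any(word in text for word in ['dashboard', 'admin', 'panel']):
--         return 'dashboard'
--     elif any(word in text for word in ['analytics', 'report', 'data']):
--         return 'analytics'
--     else:
--         return 'general'
-- ===== SOURCE B (Python) =====
-- _CATS = ['authentication', 'api_service', 'dashboard', 'analytics']
-- _KWS = [('auth', 0), ('login', 0), ('2fa', 0), ('oauth', 0),
--         ('api', 1), ('rest', 1), ('graphql', 1),
--         ('dashboard', 2), ('admin', 2), ('panel', 2),
--         ('analytics', 3), ('report', 3), ('data', 3)]
--
--
-- def _categorize_project(project):
--     name = project.get('name', '').lower()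
--     description = project.get('description', '').lower()
--     text = f"{name} {description}"
--     # One sliding-window scan over the text: at each position keep the
--     # lowest-priority category whose keyword starts there.
--     best = len(_CATS)
--     for i in range(len(text)):
--         for kw, cat in _KWS:
--             if cat < best and text.startswith(kw, i):
--                 best = cat
--     return _CATS[best] if best < len(_CATS) else 'general'
-- ===== Notes on version B (the rewrite author's own statement) =====
-- stated objective: alternative
-- what changed: Replaces the ordered if/elif chain of per-group substring searches by a single sliding-window scan over the text that keeps the minimum-priority keyword starting at each position, indexing the category table at the end.
import Mathlib
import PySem

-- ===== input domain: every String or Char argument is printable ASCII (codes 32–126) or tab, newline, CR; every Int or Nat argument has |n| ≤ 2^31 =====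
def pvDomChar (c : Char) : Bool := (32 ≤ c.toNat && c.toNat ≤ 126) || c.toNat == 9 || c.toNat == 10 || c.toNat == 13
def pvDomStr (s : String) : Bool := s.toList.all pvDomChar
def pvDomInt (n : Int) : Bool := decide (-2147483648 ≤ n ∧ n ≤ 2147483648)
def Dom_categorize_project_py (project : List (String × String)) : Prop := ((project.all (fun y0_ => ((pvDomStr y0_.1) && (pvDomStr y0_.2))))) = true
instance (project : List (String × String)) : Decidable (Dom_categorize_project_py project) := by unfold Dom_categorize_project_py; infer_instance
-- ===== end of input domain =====

-- B replaces A's if/elif chain of per-group substring searches by one sliding-window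
-- scan over the text keeping the minimum-priority keyword match (alternative; same cost).

-- ===== PORT A =====
def categorize_project_py (project : List (String × String)) : String :=
  let name := PySem.Str.lower (PySem.Dict.getD (PySem.Dict.mk project) "name" "")
  let description := PySem.Str.lower (PySem.Dict.getD (PySem.Dict.mk project) "description" "")
  let text := name ++ " " ++ description
  if ["auth", "login", "2fa", "oauth"].any (fun word => PySem.Str.isIn word text) then
    "authentication"
  else if ["api", "rest", "graphql"].any (fun word => PySem.Str.isIn word text) then
    "api_service"
  else if ["dashboard", "admin", "panel"].any (fun word => PySem.Str.isIn word text) then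
    "dashboard"
  else if ["analytics", "report", "data"].any (fun word => PySem.Str.isIn word text) then
    "analytics"
  else
    "general"

-- ===== PORT B =====
def pvCats : List String := ["authentication", "api_service", "dashboard", "analytics"]

def pvKws : List (List Char × Nat) :=
  [("auth".toList, 0), ("login".toList, 0), ("2fa".toList, 0), ("oauth".toList, 0),
   ("api".toList, 1), ("rest".toList, 1), ("graphql".toList, 1),
   ("dashboard".toList, 2), ("admin".toList, 2), ("panel".toList, 2),
   ("analytics".toList, 3), ("report".toList, 3), ("data".toList, 3)]

-- Python's text.startswith(kw, i) with 0 ≤ i ≤ len(text) is exactly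
-- PySem.Chars.startswith (cs.drop i) kw on cs = text.toList.
def categorize_project_py_alt (project : List (String × String)) : String :=
  let name := PySem.Str.lower (PySem.Dict.getD (PySem.Dict.mk project) "name" "")
  let description := PySem.Str.lower (PySem.Dict.getD (PySem.Dict.mk project) "description" "")
  let text := name ++ " " ++ description
  let cs := text.toList
  let best := (List.range cs.length).foldl
    (fun best i => pvKws.foldl
      (fun b p => if p.2 < b ∧ PySem.Chars.startswith (cs.drop i) p.1 = true then p.2 else b)
      best)
    pvCats.length
  if best < pvCats.length then pvCats.getD best "general" else "general"

-- ===== PRECONDITION & SPEC =====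
def Spec_categorize_project_py (project : List (String × String)) (out : String) : Prop := out = categorize_project_py_alt project
instance (project : List (String × String)) (out : String) : Decidable (Spec_categorize_project_py project out) := by unfold Spec_categorize_project_py; infer_instance

-- ===== CLAIM (what is proved, stated in full; the proofs are below) =====
def Claim_equal_categorize_project_py : Prop := ∀ (project : List (String × String)), Dom_categorize_project_py project → Spec_categorize_project_py project (categorize_project_py project)

-- ===== LEMMAS AND PROOFS =====

-- generic min-fold lemmas
theorem pv_foldl_shrink {β : Type} (g : Nat → β → Nat) (hg : ∀ b x, g b x ≤ b) :
    ∀ (l : List β) (b : Nat), l.foldl g b ≤ b := by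
  intro l
  induction l with
  | nil => intro b; simp
  | cons y t ih => intro b; exact le_trans (ih (g b y)) (hg b y)

theorem pv_foldl_reach {β : Type} (g : Nat → β → Nat) (C : β → Nat → Prop)
    (hg : ∀ b x, g b x = b ∨ C x (g b x)) :
    ∀ (l : List β) (b : Nat), l.foldl g b = b ∨ ∃ x ∈ l, C x (l.foldl g b) := by
  intro l
  induction l with
  | nil => intro b; left; simp
  | cons y t ih =>
    intro b
    simp only [List.foldl_cons]
    rcases ih (g b y) with h | ⟨x, hx, hC⟩
    · rw [h]
      rcases hg b y with h' | h'
      · left; exact h'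
      · right; exact ⟨y, List.mem_cons_self, h'⟩
    · right; exact ⟨x, List.mem_cons_of_mem _ hx, hC⟩

theorem pv_foldl_le_mem {β : Type} (g : Nat → β → Nat) (hs : ∀ b x, g b x ≤ b)
    (m : Nat) (x : β) (hx : ∀ b, g b x ≤ m) :
    ∀ (l : List β) (b : Nat), x ∈ l → l.foldl g b ≤ m := by
  intro l
  induction l with
  | nil => intro b h; cases h
  | cons y t ih =>
    intro b h
    simp only [List.foldl_cons]
    rcases List.mem_cons.mp h with rfl | h'
    · exact le_trans (pv_foldl_shrink g hs t (g b x)) (hx b)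
    · exact ih (g b y) h'

-- Match cs c : some keyword of priority c occurs in cs
def pvMatch (cs : List Char) (c : Nat) : Prop :=
  ∃ p ∈ pvKws, p.2 = c ∧ PySem.Chars.isIn p.1 cs = true

theorem pvKws_facts : ∀ p ∈ pvKws, p.1 ≠ [] ∧ p.2 < 4 := by
  intro p hp
  simp only [pvKws, List.mem_cons, List.not_mem_nil, or_false] at hp
  rcases hp with rfl|rfl|rfl|rfl|rfl|rfl|rfl|rfl|rfl|rfl|rfl|rfl|rfl <;> exact ⟨by decide, by decide⟩

-- positional startswith ↔ isIn, for nonempty keywords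
theorem pv_sw_iff (cs kw : List Char) (hk : kw ≠ []) :
    (∃ i ∈ List.range cs.length, PySem.Chars.startswith (cs.drop i) kw = true) ↔
      PySem.Chars.isIn kw cs = true := by
  rw [← PySem.Chars.exists_prefix_drop_iff_isIn]
  constructor
  · rintro ⟨i, _, h⟩
    exact ⟨i, (PySem.Chars.startswith_iff _ _).mp h⟩
  · rintro ⟨j, hj⟩
    refine ⟨j, ?_, (PySem.Chars.startswith_iff _ _).mpr hj⟩
    rw [List.mem_range]
    by_contra hlen
    rw [List.drop_eq_nil_of_le (Nat.le_of_not_lt hlen)] at hj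
    exact hk (List.prefix_nil.mp hj)

-- inner fold over pvKws
theorem pv_inner_shrink (cs : List Char) (i : Nat) (l : List (List Char × Nat)) (b : Nat) :
    l.foldl (fun b p => if p.2 < b ∧ PySem.Chars.startswith (cs.drop i) p.1 = true then p.2 else b) b ≤ b := by
  apply pv_foldl_shrink
  intro b p; split_ifs with h
  · exact Nat.le_of_lt h.1
  · exact le_rfl

theorem pv_inner_reach (cs : List Char) (i : Nat) (l : List (List Char × Nat)) (b : Nat) :
    l.foldl (fun b p => if p.2 < b ∧ PySem.Chars.startswith (cs.drop i) p.1 = true then p.2 else b) b = b ∨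
      ∃ p ∈ l, PySem.Chars.startswith (cs.drop i) p.1 = true ∧
        l.foldl (fun b p => if p.2 < b ∧ PySem.Chars.startswith (cs.drop i) p.1 = true then p.2 else b) b = p.2 := by
  exact pv_foldl_reach
    (fun b p => if p.2 < b ∧ PySem.Chars.startswith (cs.drop i) p.1 = true then p.2 else b)
    (fun p r => PySem.Chars.startswith (cs.drop i) p.1 = true ∧ r = p.2)
    (fun b p => by dsimp only; split_ifs with h
                   · exact Or.inr ⟨h.2, rfl⟩
                   · exact Or.inl rfl) l b

theorem pv_inner_le (cs : List Char) (i : Nat) (l : List (List Char × Nat)) (p : List Char × Nat) (hp : p ∈ l)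
    (hsw : PySem.Chars.startswith (cs.drop i) p.1 = true) (b : Nat) :
    l.foldl (fun b p => if p.2 < b ∧ PySem.Chars.startswith (cs.drop i) p.1 = true then p.2 else b) b ≤ p.2 := by
  refine pv_foldl_le_mem
    (fun b p => if p.2 < b ∧ PySem.Chars.startswith (cs.drop i) p.1 = true then p.2 else b)
    ?_ p.2 p ?_ l b hp
  · intro b q; dsimp only; split_ifs with h
    · exact Nat.le_of_lt h.1
    · exact le_rfl
  · intro b; dsimp only; split_ifs with h
    · exact le_rfl
    · rcases Decidable.not_and_iff_or_not.mp h with h' | h'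
      · omega
      · exact absurd hsw h'

-- outer fold characterisation
def pvBest (cs : List Char) : Nat :=
  (List.range cs.length).foldl
    (fun best i => pvKws.foldl
      (fun b p => if p.2 < b ∧ PySem.Chars.startswith (cs.drop i) p.1 = true then p.2 else b) best) 4

theorem pvBest_reach (cs : List Char) :
    pvBest cs = 4 ∨ ∃ c, pvMatch cs c ∧ pvBest cs = c := by
  rcases pv_foldl_reach _
      (fun i r => ∃ p ∈ pvKws, PySem.Chars.startswith (cs.drop i) p.1 = true ∧ r = p.2)
      (fun b i => pv_inner_reach cs i pvKws b) (List.range cs.length) 4 with h | ⟨i, hi, p, hp, hsw, hr⟩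
  · exact Or.inl h
  · right
    refine ⟨p.2, ⟨p, hp, rfl, ?_⟩, hr⟩
    exact (pv_sw_iff cs p.1 (pvKws_facts p hp).1).mp ⟨i, hi, hsw⟩

theorem pvBest_le_of_match (cs : List Char) (c : Nat) (h : pvMatch cs c) : pvBest cs ≤ c := by
  rcases h with ⟨p, hp, hpc, hin⟩
  rcases (pv_sw_iff cs p.1 (pvKws_facts p hp).1).mpr hin with ⟨i, hi, hsw⟩
  subst hpc
  exact pv_foldl_le_mem _ (fun b i => pv_inner_shrink cs i pvKws b) p.2 i
    (fun b => pv_inner_le cs i pvKws p hp hsw b) _ 4 hi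

-- pvMatch at each priority, written out over the concrete table
theorem pvMatch0_iff (cs : List Char) :
    pvMatch cs 0 ↔ (PySem.Chars.isIn "auth".toList cs = true ∨ PySem.Chars.isIn "login".toList cs = true ∨
      PySem.Chars.isIn "2fa".toList cs = true ∨ PySem.Chars.isIn "oauth".toList cs = true) := by
  simp [pvMatch, pvKws]

theorem pvMatch1_iff (cs : List Char) :
    pvMatch cs 1 ↔ (PySem.Chars.isIn "api".toList cs = true ∨ PySem.Chars.isIn "rest".toList cs = true ∨
      PySem.Chars.isIn "graphql".toList cs = true) := by
  simp [pvMatch, pvKws]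

theorem pvMatch2_iff (cs : List Char) :
    pvMatch cs 2 ↔ (PySem.Chars.isIn "dashboard".toList cs = true ∨ PySem.Chars.isIn "admin".toList cs = true ∨
      PySem.Chars.isIn "panel".toList cs = true) := by
  simp [pvMatch, pvKws]

theorem pvMatch3_iff (cs : List Char) :
    pvMatch cs 3 ↔ (PySem.Chars.isIn "analytics".toList cs = true ∨ PySem.Chars.isIn "report".toList cs = true ∨
      PySem.Chars.isIn "data".toList cs = true) := by
  simp [pvMatch, pvKws]

theorem pvMatch_lt_four (cs : List Char) (c : Nat) (h : pvMatch cs c) : c < 4 := by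
  rcases h with ⟨p, hp, hpc, _⟩
  exact hpc ▸ (pvKws_facts p hp).2

-- A-side group tests, bridged to pvMatch
theorem pv_any0_iff (s : String) :
    ((["auth", "login", "2fa", "oauth"].any fun word => PySem.Str.isIn word s) = true) ↔ pvMatch s.toList 0 := by
  simp [pvMatch0_iff]

theorem pv_any1_iff (s : String) :
    ((["api", "rest", "graphql"].any fun word => PySem.Str.isIn word s) = true) ↔ pvMatch s.toList 1 := by
  simp [pvMatch1_iff]

theorem pv_any2_iff (s : String) :
    ((["dashboard", "admin", "panel"].any fun word => PySem.Str.isIn word s) = true) ↔ pvMatch s.toList 2 := by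
  simp [pvMatch2_iff]

theorem pv_any3_iff (s : String) :
    ((["analytics", "report", "data"].any fun word => PySem.Str.isIn word s) = true) ↔ pvMatch s.toList 3 := by
  simp [pvMatch3_iff]

-- ===== VERDICT (by name: the statement is the Claim_ definition above) =====
set_option maxHeartbeats 1000000 in
theorem categorize_project_py_spec : Claim_equal_categorize_project_py := by
  intro project _
  unfold Spec_categorize_project_py categorize_project_py categorize_project_py_alt
  dsimp only
  set text := PySem.Str.lower (PySem.Dict.getD (PySem.Dict.mk project) "name" "") ++ " " ++
      PySem.Str.lower (PySem.Dict.getD (PySem.Dict.mk project) "description" "") with htext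
  set cs := text.toList with hcs
  have hbest : (List.range cs.length).foldl
      (fun best i => pvKws.foldl
        (fun b p => if p.2 < b ∧ PySem.Chars.startswith (cs.drop i) p.1 = true then p.2 else b) best)
      pvCats.length = pvBest cs := rfl
  rw [hbest]
  by_cases h0 : pvMatch cs 0
  · have hb : pvBest cs = 0 := Nat.le_zero.mp (pvBest_le_of_match cs 0 h0)
    rw [if_pos ((pv_any0_iff text).mpr h0), hb]
    rfl
  · have c0 : ¬ ((["auth", "login", "2fa", "oauth"].any fun word => PySem.Str.isIn word text) = true) :=
      fun h => h0 ((pv_any0_iff text).mp h)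
    by_cases h1 : pvMatch cs 1
    · have hb1 : pvBest cs ≤ 1 := pvBest_le_of_match cs 1 h1
      have hb : pvBest cs = 1 := by
        rcases pvBest_reach cs with h | ⟨c, hm, hc⟩
        · omega
        · have := pvMatch_lt_four cs c hm
          interval_cases c
          · exact absurd hm h0
          · exact hc
          · omega
          · omega
      rw [if_neg c0, if_pos ((pv_any1_iff text).mpr h1), hb]
      rfl
    · have c1 : ¬ ((["api", "rest", "graphql"].any fun word => PySem.Str.isIn word text) = true) :=
        fun h => h1 ((pv_any1_iff text).mp h)
      by_cases h2 : pvMatch cs 2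
      · have hb2 : pvBest cs ≤ 2 := pvBest_le_of_match cs 2 h2
        have hb : pvBest cs = 2 := by
          rcases pvBest_reach cs with h | ⟨c, hm, hc⟩
          · omega
          · have := pvMatch_lt_four cs c hm
            interval_cases c
            · exact absurd hm h0
            · exact absurd hm h1
            · exact hc
            · omega
        rw [if_neg c0, if_neg c1, if_pos ((pv_any2_iff text).mpr h2), hb]
        rfl
      · have c2 : ¬ ((["dashboard", "admin", "panel"].any fun word => PySem.Str.isIn word text) = true) :=
          fun h => h2 ((pv_any2_iff text).mp h)
        by_cases h3 : pvMatch cs 3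
        · have hb3 : pvBest cs ≤ 3 := pvBest_le_of_match cs 3 h3
          have hb : pvBest cs = 3 := by
            rcases pvBest_reach cs with h | ⟨c, hm, hc⟩
            · omega
            · have := pvMatch_lt_four cs c hm
              interval_cases c
              · exact absurd hm h0
              · exact absurd hm h1
              · exact absurd hm h2
              · exact hc
          rw [if_neg c0, if_neg c1, if_neg c2, if_pos ((pv_any3_iff text).mpr h3), hb]
          rfl
        · have c3 : ¬ ((["analytics", "report", "data"].any fun word => PySem.Str.isIn word text) = true) :=
            fun h => h3 ((pv_any3_iff text).mp h)
          have hb : pvBest cs = 4 := by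
            rcases pvBest_reach cs with h | ⟨c, hm, hc⟩
            · exact h
            · have := pvMatch_lt_four cs c hm
              interval_cases c
              · exact absurd hm h0
              · exact absurd hm h1
              · exact absurd hm h2
              · exact absurd hm h3
          rw [if_neg c0, if_neg c1, if_neg c2, if_neg c3, hb]
          rfl
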